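-- pv_equiv track=rewrite | github.com/roni762583/new_swt | micro/nano/test_trading_strategy.py | last_two_swings
-- ===== SOURCE A (Python) =====
-- def last_two_swings(swings):
--     """
--     Return last two highs and last two lows (as dict), or None if missing.
--     """
--     highs = [s for s in swings if s[1] == 'high']
--     lows  = [s for s in swings if s[1] == 'low']
--     res = {}
--     if len(highs) >= 2:
--         res['h1'] = highs[-2]; res['h2'] = highs[-1]
--     if len(lows) >= 2:
--         res['l1'] = lows[-2]; res['l2'] = lows[-1]
--     return res
-- ===== SOURCE B (Python) =====
-- def last_two_swings(swings):
--     """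
--     Return last two highs and last two lows (as dict), or None if missing.
--     Single forward pass with two-slot buffers instead of building filtered lists.
--     """
--     h_prev = h_last = l_prev = l_last = None
--     hc = lc = 0
--     for s in swings:
--         t = s[1]
--         if t == 'high':
--             h_prev, h_last = h_last, s
--             hc += 1
--         elif t == 'low':
--             l_prev, l_last = l_last, s
--             lc += 1
--     res = {}
--     if hc >= 2:
--         res['h1'] = h_prev
--         res['h2'] = h_last
--     if lc >= 2:
--         res['l1'] = l_prev
--         res['l2'] = l_last
--     return res
-- ===== Notes on version B (the rewrite author's own statement) =====
-- stated objective: alternative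
-- what changed: Replaces the two filtered-list comprehensions plus negative indexing by a single forward pass keeping two-slot (previous,last) buffers and counts for highs and lows.
import Mathlib
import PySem

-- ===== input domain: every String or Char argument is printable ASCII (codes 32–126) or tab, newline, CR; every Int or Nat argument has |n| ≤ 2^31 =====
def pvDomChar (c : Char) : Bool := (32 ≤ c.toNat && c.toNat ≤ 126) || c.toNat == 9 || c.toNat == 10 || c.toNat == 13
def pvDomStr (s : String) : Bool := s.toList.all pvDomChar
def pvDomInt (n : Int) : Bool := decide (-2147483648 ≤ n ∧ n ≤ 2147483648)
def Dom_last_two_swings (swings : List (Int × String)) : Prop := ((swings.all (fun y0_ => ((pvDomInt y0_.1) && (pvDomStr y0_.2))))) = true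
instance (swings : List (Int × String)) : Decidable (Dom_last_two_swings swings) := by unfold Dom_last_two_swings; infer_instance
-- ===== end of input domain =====

-- B replaces the two filtered lists and negative indexing by one forward pass with
-- two-slot (previous,last) buffers and counts; same O(n) time, O(1) extra space.

-- ===== PORT A =====
-- highs[-2]/highs[-1] are guarded by len ≥ 2, so .getD on pyGet? is exact here.
def last_two_swings (swings : List (Int × String)) : List (String × Int × String) :=
  let highs := swings.filter (fun s => s.2 == "high")
  let lows  := swings.filter (fun s => s.2 == "low")
  let res : PySem.Dict String (Int × String) := PySem.Dict.empty
  let res := if highs.length ≥ 2 then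
      (res.insert "h1" ((PySem.List.pyGet? highs (-2)).getD (0, ""))).insert "h2"
        ((PySem.List.pyGet? highs (-1)).getD (0, ""))
    else res
  let res := if lows.length ≥ 2 then
      (res.insert "l1" ((PySem.List.pyGet? lows (-2)).getD (0, ""))).insert "l2"
        ((PySem.List.pyGet? lows (-1)).getD (0, ""))
    else res
  res.items

-- ===== PORT B =====
-- state: (h_prev, h_last, l_prev, l_last, hc, lc)
def pvStateB : Type := Option (Int × String) × Option (Int × String) × Option (Int × String) × Option (Int × String) × Nat × Nat

def pvStepB (st : pvStateB) (s : Int × String) : pvStateB :=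
  if s.2 == "high" then (st.2.1, some s, st.2.2.1, st.2.2.2.1, st.2.2.2.2.1 + 1, st.2.2.2.2.2)
  else if s.2 == "low" then (st.1, st.2.1, st.2.2.2.1, some s, st.2.2.2.2.1, st.2.2.2.2.2 + 1)
  else st

def last_two_swings_alt (swings : List (Int × String)) : List (String × Int × String) :=
  let st := swings.foldl pvStepB (none, none, none, none, 0, 0)
  let res : PySem.Dict String (Int × String) := PySem.Dict.empty
  let res := if st.2.2.2.2.1 ≥ 2 then
      (res.insert "h1" (st.1.getD (0, ""))).insert "h2" (st.2.1.getD (0, ""))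
    else res
  let res := if st.2.2.2.2.2 ≥ 2 then
      (res.insert "l1" (st.2.2.1.getD (0, ""))).insert "l2" (st.2.2.2.1.getD (0, ""))
    else res
  res.items

-- ===== PRECONDITION & SPEC =====
def Spec_last_two_swings (swings : List (Int × String)) (out : List (String × Int × String)) : Prop := out = last_two_swings_alt swings
instance (swings : List (Int × String)) (out : List (String × Int × String)) : Decidable (Spec_last_two_swings swings out) := by unfold Spec_last_two_swings; infer_instance

-- ===== CLAIM (what is proved, stated in full; the proofs are below) =====
def Claim_equal_last_two_swings : Prop := ∀ (swings : List (Int × String)), Dom_last_two_swings swings → Spec_last_two_swings swings (last_two_swings swings)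

-- ===== LEMMAS AND PROOFS =====

/-- The fold state reached after consuming highs `H` and lows `L`. -/
def pvStOf (H L : List (Int × String)) : pvStateB :=
  (H.dropLast.getLast?, H.getLast?, L.dropLast.getLast?, L.getLast?, H.length, L.length)

theorem pvStepB_high (H L : List (Int × String)) (s : Int × String) (h : s.2 = "high") :
    pvStepB (pvStOf H L) s = pvStOf (H ++ [s]) L := by
  simp [pvStepB, pvStOf, h]

theorem pvStepB_low (H L : List (Int × String)) (s : Int × String) (h : s.2 = "low") :
    pvStepB (pvStOf H L) s = pvStOf H (L ++ [s]) := by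
  simp [pvStepB, pvStOf, h]

theorem pvStepB_other (H L : List (Int × String)) (s : Int × String)
    (h1 : ¬ s.2 = "high") (h2 : ¬ s.2 = "low") :
    pvStepB (pvStOf H L) s = pvStOf H L := by
  simp [pvStepB, h1, h2]

/-- Fold invariant: starting from the state of `(H, L)`, folding `xs` yields the
state of the extended filtered lists. -/
theorem pvFold_inv (xs : List (Int × String)) :
    ∀ H L : List (Int × String),
      xs.foldl pvStepB (pvStOf H L)
        = pvStOf (H ++ xs.filter (fun s => s.2 == "high"))
                 (L ++ xs.filter (fun s => s.2 == "low")) := by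
  induction xs with
  | nil => intro H L; simp
  | cons x xs ih =>
    intro H L
    by_cases hx : x.2 = "high"
    · have hlo : ¬ x.2 = "low" := by simp [hx]
      simp only [List.foldl_cons, pvStepB_high H L x hx, ih (H ++ [x]) L,
        List.filter_cons, hx]
      simp
    · by_cases hl : x.2 = "low"
      · simp only [List.foldl_cons, pvStepB_low H L x hl, ih H (L ++ [x]),
          List.filter_cons, hl]
        simp
      · simp only [List.foldl_cons, pvStepB_other H L x hx hl, ih H L,
          List.filter_cons]
        simp [hx, hl]

theorem pvGet_neg_two (xs : List (Int × String)) (h : 2 ≤ xs.length) :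
    PySem.List.pyGet? xs (-2) = xs.dropLast.getLast? := by
  rw [PySem.List.pyGet?_neg_ofNat xs 2 (by omega) h]
  rw [List.getLast?_eq_getElem?, List.getElem?_dropLast, List.length_dropLast]
  have h1 : xs.length - 1 - 1 = xs.length - 2 := by omega
  rw [h1]
  simp [show xs.length - 2 < xs.length - 1 by omega]

-- ===== VERDICT (by name: the statement is the Claim_ definition above) =====
theorem last_two_swings_spec : Claim_equal_last_two_swings := by
  intro swings _
  unfold Spec_last_two_swings last_two_swings last_two_swings_alt
  have hfold := pvFold_inv swings [] []
  simp only [List.nil_append] at hfold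
  have h0 : pvStOf ([] : List (Int × String)) [] = (none, none, none, none, 0, 0) := by
    simp [pvStOf]
  rw [← h0, hfold]
  set highs := swings.filter (fun s => s.2 == "high") with hH
  set lows := swings.filter (fun s => s.2 == "low") with hL
  simp only [pvStOf]
  by_cases h2 : highs.length ≥ 2
  · by_cases l2 : lows.length ≥ 2
    · simp [h2, l2, PySem.List.pyGet?_neg_one, pvGet_neg_two highs h2, pvGet_neg_two lows l2]
    · simp [h2, l2, PySem.List.pyGet?_neg_one, pvGet_neg_two highs h2]
  · by_cases l2 : lows.length ≥ 2
    · simp [h2, l2, PySem.List.pyGet?_neg_one, pvGet_neg_two lows l2]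
    · simp [h2, l2]
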